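-- pv_equiv track=rewrite | github.com/soohyunme/Study | BOJ/Basic/4673.py | self_num
-- ===== SOURCE A (Python) =====
-- def self_num(n):
--     ret_ = n
--     while True:
--         if n < 10:
--             ret_ += n
--             break
--         ret_ += n % 10
--         n = n // 10
--     return ret_
-- ===== SOURCE B (Python) =====
-- def self_num(n):
--     if n < 10:
--         return 2 * n
--     s = 0
--     p = 10
--     while p <= n:
--         s += n // p
--         p *= 10
--     return 2 * n - 9 * s
-- ===== Notes on version B (the rewrite author's own statement) =====
-- stated objective: alternative
-- what changed: B computes the digit sum arithmetically as n - 9*sum(n//10**k) by summing quotients by growing powers of ten, instead of A's per-digit mod/div accumulator loop.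
import Mathlib
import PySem

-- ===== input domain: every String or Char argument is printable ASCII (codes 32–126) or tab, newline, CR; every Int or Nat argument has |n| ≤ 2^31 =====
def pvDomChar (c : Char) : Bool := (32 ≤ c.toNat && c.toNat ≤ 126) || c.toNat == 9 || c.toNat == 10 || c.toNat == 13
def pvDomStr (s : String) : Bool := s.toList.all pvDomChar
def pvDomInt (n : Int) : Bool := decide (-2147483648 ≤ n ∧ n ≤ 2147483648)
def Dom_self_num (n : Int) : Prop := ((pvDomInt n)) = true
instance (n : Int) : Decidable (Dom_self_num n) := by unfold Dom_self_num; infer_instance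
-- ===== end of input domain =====

-- B replaces A's per-digit mod/div accumulator loop by the arithmetic identity
-- digitsum(n) = n - 9*sum(n//10^k): it sums quotients by growing powers of ten (objective: alternative).


-- ===== PORT A =====
-- A's 'while True' loop; state: current n and the accumulator ret_
def selfNumLoop (n ret : Int) : Int :=
  if _h : n < 10 then ret + n
  else selfNumLoop (PySem.Int.floordiv n 10) (ret + PySem.Int.mod n 10)
termination_by n.toNat
decreasing_by
  rw [PySem.Int.floordiv_eq_ediv_of_pos (a := n) (b := 10) (by omega)]
  omega

def self_num (n : Int) : Int := selfNumLoop n n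

-- ===== PORT B =====
-- B's 'while p <= n' loop; state: power p and sum of quotients s.
-- The '0 < p' conjunct is only a totality guard: every call starts at p = 10 and p only grows.
def quotSumLoop (n p s : Int) : Int :=
  if _h : 0 < p ∧ p ≤ n then quotSumLoop n (p * 10) (s + PySem.Int.floordiv n p)
  else s
termination_by (n + 1 - p).toNat
decreasing_by omega

def self_num_alt (n : Int) : Int :=
  if n < 10 then 2 * n
  else 2 * n - 9 * quotSumLoop n 10 0

-- ===== PRECONDITION & SPEC =====
def Spec_self_num (n : Int) (out : Int) : Prop := out = self_num_alt n
instance (n : Int) (out : Int) : Decidable (Spec_self_num n out) := by unfold Spec_self_num; infer_instance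

-- ===== CLAIM (what is proved, stated in full; the proofs are below) =====
def Claim_equal_self_num : Prop := ∀ (n : Int), Dom_self_num n → Spec_self_num n (self_num n)

-- ===== LEMMAS AND PROOFS =====
-- proof helper: G m = m + m/10 + m/100 + … (0 for m < 1)
def quotTail (m : Int) : Int :=
  if _h : m < 1 then 0 else m + quotTail (m / 10)
termination_by m.toNat
decreasing_by omega

theorem quotSumLoop_eq (n : Int) (hn : 0 ≤ n) :
    ∀ p s : Int, 0 < p → quotSumLoop n p s = s + quotTail (n / p) := by
  intro p s
  induction p, s using quotSumLoop.induct n with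
  | case1 p s hc ih =>
    intro hp
    rw [quotSumLoop, dif_pos hc, ih (by omega),
        PySem.Int.floordiv_eq_ediv_of_pos (a := n) (b := p) hp]
    have h10 : n / (p * 10) = n / p / 10 := (Int.ediv_ediv_of_nonneg (by omega)).symm
    have hq : 1 ≤ n / p := Int.le_ediv_iff_mul_le hp |>.mpr (by omega)
    rw [h10]
    conv_rhs => rw [quotTail]
    rw [dif_neg (by omega : ¬ n / p < 1)]
    ring
  | case2 p s hc =>
    intro hp
    rw [quotSumLoop, dif_neg hc]
    have hlt : p > n := by omega
    have : n / p = 0 := Int.ediv_eq_zero_of_lt hn hlt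
    rw [this, quotTail, dif_pos (by omega)]
    ring

-- A's loop result expressed through the accumulator
def dsA (m : Int) : Int :=
  if _h : m < 10 then m
  else PySem.Int.mod m 10 + dsA (PySem.Int.floordiv m 10)
termination_by m.toNat
decreasing_by
  rw [PySem.Int.floordiv_eq_ediv_of_pos (a := m) (b := 10) (by omega)]
  omega

theorem selfNumLoop_eq_add_ds (n ret : Int) : selfNumLoop n ret = ret + dsA n := by
  induction n, ret using selfNumLoop.induct with
  | case1 n ret h => rw [selfNumLoop, dsA, dif_pos h, dif_pos h]
  | case2 n ret h ih => rw [selfNumLoop, dsA, dif_neg h, dif_neg h, ih]; ring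

theorem dsA_eq_sub_quotTail (m : Int) (hm : 0 ≤ m) : dsA m = m - 9 * quotTail (m / 10) := by
  induction m using dsA.induct with
  | case1 m h =>
    rw [dsA, dif_pos h]
    have : m / 10 = 0 := Int.ediv_eq_zero_of_lt hm (by omega)
    rw [this, quotTail, dif_pos (by omega)]
    ring
  | case2 m h ih =>
    have hf : PySem.Int.floordiv m 10 = m / 10 :=
      PySem.Int.floordiv_eq_ediv_of_pos (a := m) (b := 10) (by omega)
    have hmo : PySem.Int.mod m 10 = m % 10 :=
      PySem.Int.mod_eq_emod_of_pos (a := m) (b := 10) (by omega)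
    rw [hf] at ih
    rw [dsA, dif_neg h, hf, hmo, ih (by positivity)]
    have hq : 1 ≤ m / 10 := by omega
    conv_rhs => rw [quotTail, dif_neg (by omega)]
    have hmod : m % 10 = m - 10 * (m / 10) := Int.emod_def m 10 ▸ by ring
    rw [hmod]
    ring

-- ===== VERDICT (by name: the statement is the Claim_ definition above) =====
theorem self_num_spec : Claim_equal_self_num := by
  intro n _
  unfold Spec_self_num self_num self_num_alt
  rw [selfNumLoop_eq_add_ds]
  by_cases h : n < 10
  · rw [if_pos h, dsA, dif_pos h]; ring
  · rw [if_neg h, quotSumLoop_eq n (by omega) 10 0 (by omega),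
        dsA_eq_sub_quotTail n (by omega)]
    ring
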